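-- pv_equiv track=rewrite | github.com/jsboige/CoursIA | slides/_tools/marp_to_slidev.py | split_slides
-- ===== SOURCE A (Python) =====
-- def split_slides(marp_content: str) -> list:
--     """Split markdown content by --- separators."""
--     slides = []
--     current = []
--     for line in marp_content.split('\n'):
--         if line.strip() == '---':
--             slides.append('\n'.join(current))
--             current = []
--         else:
--             current.append(line)
--     if current:
--         slides.append('\n'.join(current))
--     return slides
-- ===== SOURCE B (Python) =====
-- def split_slides(marp_content: str) -> list:
--     """Split markdown content by --- separators."""
--     slides = []
--     lines = marp_content.split('\n')
--     while True:
--         i = next((k for k, line in enumerate(lines) if line.strip() == '---'), None)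
--         if i is None:
--             if lines:
--                 slides.append('\n'.join(lines))
--             return slides
--         slides.append('\n'.join(lines[:i]))
--         lines = lines[i + 1:]
-- ===== Notes on version B (the rewrite author's own statement) =====
-- stated objective: alternative
-- what changed: B replaces A's single line-by-line fold with a current-line buffer by a loop that finds the index of the next separator line and emits the slice of lines before it, continuing on the remaining lines.
import Mathlib
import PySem

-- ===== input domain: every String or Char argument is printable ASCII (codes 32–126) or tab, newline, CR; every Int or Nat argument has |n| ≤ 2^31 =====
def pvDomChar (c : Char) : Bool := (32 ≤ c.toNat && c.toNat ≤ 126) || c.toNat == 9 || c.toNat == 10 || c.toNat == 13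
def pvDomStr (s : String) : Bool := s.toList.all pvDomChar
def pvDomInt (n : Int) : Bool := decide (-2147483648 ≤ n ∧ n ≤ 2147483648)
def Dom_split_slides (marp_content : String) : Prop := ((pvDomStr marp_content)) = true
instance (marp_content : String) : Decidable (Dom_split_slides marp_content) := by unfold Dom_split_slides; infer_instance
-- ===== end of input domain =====

-- B replaces A's line-by-line fold with a loop that finds the next '---' line and emits the slice before it (alternative decomposition, not faster).

-- lines = s.split('\n') (PySem.Chars.splitOn is the exact sep ≠ "" split)
def pyLines (s : String) : List String := (PySem.Chars.splitOn s.toList ['\n']).map String.ofList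

-- ===== PORT A =====
-- one fold step of A's for-loop: state = (slides, current)
def aStep (st : List String × List String) (line : String) : List String × List String :=
  if PySem.Str.strip line == "---" then (st.1 ++ [PySem.Str.join "\n" st.2], [])
  else (st.1, st.2 ++ [line])

def split_slides (marp_content : String) : List String :=
  let st := (pyLines marp_content).foldl aStep ([], [])
  if st.2.isEmpty then st.1 else st.1 ++ [PySem.Str.join "\n" st.2]

-- ===== PORT B =====
-- B's while-loop: find the first separator line, emit the slice before it, continue on the rest
def bLoop (lines : List String) : List String :=
  match h : lines.findIdx? (fun l => PySem.Str.strip l == "---") with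
  | some i =>
      PySem.Str.join "\n" (lines.take i) :: bLoop (lines.drop (i + 1))
  | none => if lines.isEmpty then [] else [PySem.Str.join "\n" lines]
termination_by lines.length
decreasing_by
  have hi := List.findIdx?_eq_some_iff_findIdx_eq.mp h
  simp only [List.length_drop]
  omega

def split_slides_alt (marp_content : String) : List String :=
  bLoop (pyLines marp_content)

-- ===== PRECONDITION & SPEC =====
def Spec_split_slides (marp_content : String) (out : List String) : Prop := out = split_slides_alt marp_content
instance (marp_content : String) (out : List String) : Decidable (Spec_split_slides marp_content out) := by unfold Spec_split_slides; infer_instance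

-- ===== CLAIM (what is proved, stated in full; the proofs are below) =====
def Claim_equal_split_slides : Prop := ∀ (marp_content : String), Dom_split_slides marp_content → Spec_split_slides marp_content (split_slides marp_content)

-- ===== LEMMAS AND PROOFS =====

-- proof-only recursive characterisation: chunks of `ls` with pending buffer `cur`
def chunks (cur : List String) : List String → List String
  | [] => if cur.isEmpty then [] else [PySem.Str.join "\n" cur]
  | l :: ls =>
      if PySem.Str.strip l == "---" then PySem.Str.join "\n" cur :: chunks [] ls
      else chunks (cur ++ [l]) ls

-- what bLoop computes, generalized by a pending prefix `cur`
def bMatch (cur ls : List String) : List String :=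
  match ls.findIdx? (fun l => PySem.Str.strip l == "---") with
  | some i => PySem.Str.join "\n" (cur ++ ls.take i) :: bLoop (ls.drop (i + 1))
  | none => if (cur ++ ls).isEmpty then [] else [PySem.Str.join "\n" (cur ++ ls)]

theorem bLoop_eq_bMatch (ls : List String) : bLoop ls = bMatch [] ls := by
  rw [bLoop.eq_def, bMatch]
  cases ls.findIdx? (fun l => PySem.Str.strip l == "---") <;> simp

theorem chunks_eq_bMatch (ls : List String) : ∀ cur, chunks cur ls = bMatch cur ls := by
  induction ls with
  | nil => intro cur; simp [chunks, bMatch]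
  | cons l ls ih =>
      intro cur
      by_cases hp : (PySem.Str.strip l == "---") = true
      · rw [show chunks cur (l :: ls) = PySem.Str.join "\n" cur :: chunks [] ls by
              simp [chunks, hp], ih [], ← bLoop_eq_bMatch]
        simp [bMatch, List.findIdx?_cons, hp]
      · simp only [chunks, hp, if_neg, Bool.false_eq_true, not_false_iff]
        rw [ih (cur ++ [l])]
        simp only [bMatch, List.findIdx?_cons, hp]
        cases hfi : ls.findIdx? (fun l => PySem.Str.strip l == "---") with
        | some i => simp [List.append_assoc]
        | none => simp

theorem foldl_aStep_eq (ls : List String) : ∀ acc cur,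
    (let st := ls.foldl aStep (acc, cur);
     if st.2.isEmpty then st.1 else st.1 ++ [PySem.Str.join "\n" st.2])
    = acc ++ chunks cur ls := by
  induction ls with
  | nil =>
      intro acc cur
      simp only [List.foldl_nil, chunks]
      cases cur <;> simp
  | cons l ls ih =>
      intro acc cur
      simp only [List.foldl_cons, aStep, chunks]
      by_cases hp : (PySem.Str.strip l == "---") = true
      · simp only [hp, if_pos]
        rw [ih]
        simp
      · simp only [hp, if_neg, Bool.false_eq_true, not_false_iff]
        rw [ih]

-- ===== VERDICT (by name: the statement is the Claim_ definition above) =====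
theorem split_slides_spec : Claim_equal_split_slides := by
  intro m _
  unfold Spec_split_slides split_slides split_slides_alt
  rw [foldl_aStep_eq, chunks_eq_bMatch, bLoop_eq_bMatch, List.nil_append]
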